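-- pv_equiv track=rewrite | github.com/RealHartlMax/CineScore-AI | src/cinescore_ai/resolve.py | _match_codec_name
-- ===== SOURCE A (Python) =====
-- from typing import Any
--
-- def _match_codec_name(codecs: dict[Any, Any], preferred_codec: str) -> str | None:
--     preferred = preferred_codec.strip().lower()
--     for candidate in codecs.values():
--         candidate_text = str(candidate)
--         if candidate_text.lower() == preferred:
--             return candidate_text
--     for key, candidate in codecs.items():
--         if str(key).strip().lower() == preferred:
--             return str(candidate)
--     return None
-- ===== SOURCE B (Python) =====
-- def _match_codec_name(codecs, preferred_codec):
--     preferred = preferred_codec.strip().lower()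
--     fallback = None
--     for key, candidate in codecs.items():
--         candidate_text = str(candidate)
--         if candidate_text.lower() == preferred:
--             return candidate_text
--         if fallback is None and str(key).strip().lower() == preferred:
--             fallback = candidate_text
--     return fallback
-- ===== Notes on version B (the rewrite author's own statement) =====
-- stated objective: alternative
-- what changed: Fuses A's two separate scans (values first, then keys) into one pass that returns a value match immediately and only remembers the first key match as a fallback, preserving value-over-key priority.
import Mathlib
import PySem

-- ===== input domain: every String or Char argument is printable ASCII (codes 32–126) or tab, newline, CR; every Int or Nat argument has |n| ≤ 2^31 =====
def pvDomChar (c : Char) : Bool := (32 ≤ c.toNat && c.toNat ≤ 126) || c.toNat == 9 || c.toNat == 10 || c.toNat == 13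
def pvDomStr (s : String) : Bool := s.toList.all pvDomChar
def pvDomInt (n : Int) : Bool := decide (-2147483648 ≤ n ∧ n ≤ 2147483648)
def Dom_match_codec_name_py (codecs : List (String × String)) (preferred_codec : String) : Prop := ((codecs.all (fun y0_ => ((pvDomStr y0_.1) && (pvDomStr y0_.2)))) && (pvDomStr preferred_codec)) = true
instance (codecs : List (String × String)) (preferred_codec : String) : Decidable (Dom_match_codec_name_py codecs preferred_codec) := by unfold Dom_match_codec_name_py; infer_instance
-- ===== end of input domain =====

-- B fuses A's two scans (values first, then keys) into one pass that returns a value match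
-- immediately and remembers only the first key match as a fallback (objective: alternative).

-- ===== PORT A =====
-- first pass of A: over values
def pvScanVals (preferred : String) : List (String × String) → Option String
  | [] => none
  | (_, c) :: rest =>
    if PySem.Str.lower c = preferred then some c else pvScanVals preferred rest

-- second pass of A: over keys
def pvScanKeys (preferred : String) : List (String × String) → Option String
  | [] => none
  | (k, c) :: rest =>
    if PySem.Str.lower (PySem.Str.strip k) = preferred then some c
    else pvScanKeys preferred rest

def match_codec_name_py (codecs : List (String × String)) (preferred_codec : String) : Option String :=
  let preferred := PySem.Str.lower (PySem.Str.strip preferred_codec)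
  match pvScanVals preferred codecs with
  | some c => some c
  | none => pvScanKeys preferred codecs

-- ===== PORT B =====
-- B: one fused pass; value match returns immediately, first key match remembered as fallback
def pvFused (preferred : String) (fallback : Option String) : List (String × String) → Option String
  | [] => fallback
  | (k, c) :: rest =>
    if PySem.Str.lower c = preferred then some c
    else
      pvFused preferred
        (if fallback = none ∧ PySem.Str.lower (PySem.Str.strip k) = preferred then some c
         else fallback) rest

def match_codec_name_py_alt (codecs : List (String × String)) (preferred_codec : String) : Option String :=
  pvFused (PySem.Str.lower (PySem.Str.strip preferred_codec)) none codecs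

-- ===== PRECONDITION & SPEC =====
def Spec_match_codec_name_py (codecs : List (String × String)) (preferred_codec : String) (out : Option String) : Prop := out = match_codec_name_py_alt codecs preferred_codec
instance (codecs : List (String × String)) (preferred_codec : String) (out : Option String) : Decidable (Spec_match_codec_name_py codecs preferred_codec out) := by unfold Spec_match_codec_name_py; infer_instance

-- ===== CLAIM (what is proved, stated in full; the proofs are below) =====
def Claim_equal_match_codec_name_py : Prop := ∀ (codecs : List (String × String)) (preferred_codec : String), Dom_match_codec_name_py codecs preferred_codec → Spec_match_codec_name_py codecs preferred_codec (match_codec_name_py codecs preferred_codec)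

-- ===== LEMMAS AND PROOFS =====

-- ===== VERDICT (by name: the statement is the Claim_ definition above) =====
theorem pvFused_eq (preferred : String) (l : List (String × String)) :
    ∀ fallback, pvFused preferred fallback l =
      (pvScanVals preferred l).or (fallback.or (pvScanKeys preferred l)) := by
  induction l with
  | nil => intro fb; simp [pvFused, pvScanVals, pvScanKeys]
  | cons hd tl ih =>
    intro fb
    obtain ⟨k, c⟩ := hd
    by_cases hv : PySem.Str.lower c = preferred
    · simp [pvFused, pvScanVals, hv]
    · simp only [pvFused, pvScanVals, pvScanKeys, hv, ih]
      cases fb with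
      | none => by_cases hk : PySem.Str.lower (PySem.Str.strip k) = preferred <;> simp [hk]
      | some x => by_cases hk : PySem.Str.lower (PySem.Str.strip k) = preferred <;> simp [hk]

theorem match_codec_name_py_spec : Claim_equal_match_codec_name_py := by
  intro codecs preferred_codec _
  unfold Spec_match_codec_name_py match_codec_name_py match_codec_name_py_alt
  rw [pvFused_eq]
  cases h : pvScanVals (PySem.Str.lower (PySem.Str.strip preferred_codec)) codecs <;> simp [h]
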